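-- pv_equiv track=rewrite | github.com/davidiach/erdos97 | scripts/sat_smt_n10_n11_n12.py | cyclic_rotations
-- ===== SOURCE A (Python) =====
-- def cyclic_rotations(pattern):
--     n = len(pattern)
--     out = []
--     for r in range(n):
--         new_pattern = [None] * n
--         for i in range(n):
--             new_i = (i + r) % n
--             new_pattern[new_i] = tuple(sorted(((j + r) % n) for j in pattern[i]))
--         out.append(tuple(new_pattern))
--     return out
-- ===== SOURCE B (Python) =====
-- def _inc_row(n, e):
--     return tuple(sorted((x + 1) % n for x in e))
--
--
-- def cyclic_rotations(pattern):
--     n = len(pattern)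
--     if n == 0:
--         return []
--     cur = tuple(tuple(sorted(j % n for j in row)) for row in pattern)
--     out = [cur]
--     for _ in range(n - 1):
--         shifted = (cur[-1],) + cur[:-1]
--         cur = tuple(_inc_row(n, e) for e in shifted)
--         out.append(cur)
--     return out
-- ===== Notes on version B (the rewrite author's own statement) =====
-- stated objective: alternative
-- what changed: Instead of recomputing every rotation from the raw pattern with index-scatter writes, B computes rotation 0 once and derives each subsequent rotation incrementally from the previous one by a cyclic right shift of the outer tuple plus an increment-mod-n-and-resort of each inner tuple.
import Mathlib
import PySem

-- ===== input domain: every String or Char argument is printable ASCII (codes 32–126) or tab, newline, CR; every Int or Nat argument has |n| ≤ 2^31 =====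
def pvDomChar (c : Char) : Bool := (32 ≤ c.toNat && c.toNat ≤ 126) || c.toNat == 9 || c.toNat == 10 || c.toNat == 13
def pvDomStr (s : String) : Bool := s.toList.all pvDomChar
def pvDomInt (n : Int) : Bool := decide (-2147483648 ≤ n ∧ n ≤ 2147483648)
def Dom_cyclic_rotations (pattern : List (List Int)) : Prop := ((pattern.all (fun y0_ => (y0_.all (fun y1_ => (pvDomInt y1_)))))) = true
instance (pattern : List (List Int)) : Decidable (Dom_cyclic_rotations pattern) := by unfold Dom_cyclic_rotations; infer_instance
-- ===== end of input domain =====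

-- B derives each rotation incrementally from the previous one (shift + increment mod n + resort)
-- instead of A's per-rotation scatter writes; objective: alternative decomposition, same cost.

-- ===== PORT A =====
-- Python's `[None] * n` buffer is ported as `List.replicate n []`: the inner loop writes every
-- slot exactly once (i ↦ (i+r) % n is a bijection on range n), so the placeholder never survives.
-- `pattern[i]` with 0 ≤ i < len(pattern) is ported as `pattern.getD i []` (always in range).
-- Here `%` is always taken with the positive divisor n = len(pattern) (the loops run only when
-- n > 0), where Lean's Int.emod coincides with Python's `%`.
def cyclic_rotations (pattern : List (List Int)) : List (List (List Int)) :=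
  let n := pattern.length
  (List.range n).foldl (fun out r =>
    let new_pattern := (List.range n).foldl (fun np i =>
      np.set ((i + r) % n)
        (PySem.List.sorted ((pattern.getD i []).map (fun j => (j + (r : Int)) % (n : Int))) (fun x => x) false))
      (List.replicate n ([] : List Int))
    out ++ [new_pattern]) []

-- ===== PORT B =====
def pvIncRow (n : Int) (e : List Int) : List Int :=
  PySem.List.sorted (e.map (fun x => (x + 1) % n)) (fun x => x) false

-- `cur[-1]` is ported with PySem.List.pyGet? (cur is nonempty, so `.getD []` never fires)
-- and `cur[:-1]` with PySem.List.slice.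
def cyclic_rotations_alt (pattern : List (List Int)) : List (List (List Int)) :=
  let n := pattern.length
  if n = 0 then []
  else
    let cur0 := pattern.map (fun row =>
      PySem.List.sorted (row.map (fun j => j % (n : Int))) (fun x => x) false)
    ((List.range (n - 1)).foldl (fun st _ =>
        let shifted := (PySem.List.pyGet? st.2 (-1)).getD [] :: PySem.List.slice st.2 none (some (-1))
        let nxt := shifted.map (pvIncRow (n : Int))
        (st.1 ++ [nxt], nxt))
      ([cur0], cur0)).1

-- ===== PRECONDITION & SPEC =====
def Spec_cyclic_rotations (pattern : List (List Int)) (out : List (List (List Int))) : Prop := out = cyclic_rotations_alt pattern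
instance (pattern : List (List Int)) (out : List (List (List Int))) : Decidable (Spec_cyclic_rotations pattern out) := by unfold Spec_cyclic_rotations; infer_instance

-- ===== CLAIM (what is proved, stated in full; the proofs are below) =====
def Claim_equal_cyclic_rotations : Prop := ∀ (pattern : List (List Int)), Dom_cyclic_rotations pattern → Spec_cyclic_rotations pattern (cyclic_rotations pattern)

-- ===== LEMMAS AND PROOFS =====

theorem pvFoldl_append_map {α β : Type} (l : List α) (f : α → β) (init : List β) :
    l.foldl (fun acc x => acc ++ [f x]) init = init ++ l.map f := by
  induction l generalizing init with
  | nil => simp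
  | cons a t ih => simp [List.foldl, ih]

-- the sorted residue row contributed by source index i at rotation r
def pvValA (pattern : List (List Int)) (n r i : Nat) : List Int :=
  PySem.List.sorted ((pattern.getD i []).map (fun j => (j + (r : Int)) % (n : Int))) (fun x => x) false

-- the source index landing at target position k under rotation r
def pvPrevIdx (n r k : Nat) : Nat := if k < r then k + n - r else k - r

-- the common closed form of rotation r
def pvRotSpec (pattern : List (List Int)) (n r : Nat) : List (List Int) :=
  (List.range n).map (fun k => pvValA pattern n r (pvPrevIdx n r k))

theorem pvSigma_eq (n i r : Nat) (hi : i < n) (hr : r < n) :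
    (i + r) % n = if i + r < n then i + r else i + r - n := by
  split
  · exact Nat.mod_eq_of_lt ‹_›
  · rw [Nat.mod_eq_sub_mod (by omega)]
    exact Nat.mod_eq_of_lt (by omega)

theorem pvLength_foldl_set (l : List Nat) (g : Nat → Nat) (f : Nat → List Int)
    (init : List (List Int)) :
    ((l.foldl (fun np i => np.set (g i) (f i)) init)).length = init.length := by
  induction l generalizing init with
  | nil => rfl
  | cons a t ih => simp [List.foldl, ih]

theorem pvScatter (pattern : List (List Int)) (n r : Nat) (hr : r < n) :
    ∀ m, m ≤ n → ∀ k, k < n →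
      ((List.range m).foldl (fun np i =>
          np.set ((i + r) % n) (pvValA pattern n r i))
        (List.replicate n ([] : List Int)))[k]? =
      some (if pvPrevIdx n r k < m then pvValA pattern n r (pvPrevIdx n r k) else []) := by
  intro m
  induction m with
  | zero =>
    intro _ k hk
    simp [hk]
  | succ m ih =>
    intro hm k hk
    have hlen : ((List.range m).foldl (fun np i =>
        np.set ((i + r) % n) (pvValA pattern n r i))
        (List.replicate n ([] : List Int))).length = n := by
      simpa using pvLength_foldl_set (List.range m) (fun i => (i + r) % n)
        (fun i => pvValA pattern n r i) (List.replicate n ([] : List Int))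
    rw [List.range_succ, List.foldl_append]
    simp only [List.foldl_cons, List.foldl_nil]
    rw [List.getElem?_set]
    have hiff : ((m + r) % n = k) ↔ (pvPrevIdx n r k = m) := by
      rw [pvSigma_eq n m r (by omega) hr]
      unfold pvPrevIdx
      constructor <;> intro h <;> (split at h <;> split <;> omega)
    by_cases hpk : pvPrevIdx n r k = m
    · have hset : (m + r) % n = k := hiff.mpr hpk
      simp [hset, hlen, hk, hpk]
    · have hset : (m + r) % n ≠ k := fun h => hpk (hiff.mp h)
      rw [if_neg hset, ih (by omega) k hk]
      by_cases h2 : pvPrevIdx n r k < m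
      · rw [if_pos h2, if_pos (by omega)]
      · rw [if_neg h2, if_neg (by omega)]

theorem pvA_row (pattern : List (List Int)) (n r : Nat) (hn : n = pattern.length) (hr : r < n) :
    (List.range n).foldl (fun np i =>
        np.set ((i + r) % n)
          (PySem.List.sorted ((pattern.getD i []).map (fun j => (j + (r : Int)) % (n : Int))) (fun x => x) false))
      (List.replicate n ([] : List Int)) = pvRotSpec pattern n r := by
  have hlen : ((List.range n).foldl (fun np i =>
      np.set ((i + r) % n)
        (PySem.List.sorted ((pattern.getD i []).map (fun j => (j + (r : Int)) % (n : Int))) (fun x => x) false))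
      (List.replicate n ([] : List Int))).length = n := by
    simpa using pvLength_foldl_set (List.range n) (fun i => (i + r) % n)
      (fun i => PySem.List.sorted ((pattern.getD i []).map (fun j => (j + (r : Int)) % (n : Int))) (fun x => x) false)
      (List.replicate n ([] : List Int))
  apply List.ext_getElem?
  intro k
  by_cases hk : k < n
  · have h := pvScatter pattern n r hr n le_rfl k hk
    have hprev : pvPrevIdx n r k < n := by unfold pvPrevIdx; split <;> omega
    simp only [pvValA] at h
    rw [h, if_pos hprev]
    simp [pvRotSpec, pvValA, hk]
  · rw [List.getElem?_eq_none (by rw [hlen]; omega),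
      List.getElem?_eq_none (by simp [pvRotSpec]; omega)]

theorem pvInc_val (pattern : List (List Int)) (n r i : Nat) :
    pvIncRow (n : Int) (pvValA pattern n r i) = pvValA pattern n (r + 1) i := by
  unfold pvIncRow pvValA
  rw [PySem.List.sorted_eq_sorted_of_perm _ _ _ (fun a b hab => hab)
    ((PySem.List.sorted_perm _ _ _).map _)]
  congr 1
  rw [List.map_map]
  apply List.map_congr_left
  intro j _
  simp only [Function.comp_apply]
  have hmod : ∀ a : Int, (a % (n : Int) + 1) % (n : Int) = (a + 1) % (n : Int) := by
    intro a
    conv_rhs => rw [Int.add_emod]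
    rw [Int.add_emod (a % (n : Int)) 1, Int.emod_emod_of_dvd _ dvd_rfl]
  rw [hmod]
  congr 1
  push_cast
  ring

theorem pvRot0 (pattern : List (List Int)) :
    pvRotSpec pattern pattern.length 0 =
      pattern.map (fun row =>
        PySem.List.sorted (row.map (fun j => j % (pattern.length : Int))) (fun x => x) false) := by
  apply List.ext_getElem
  · simp [pvRotSpec]
  intro k h1 h2
  simp only [pvRotSpec, pvValA, pvPrevIdx, List.getElem_map, List.getElem_range] at h1 ⊢
  rw [if_neg (by omega), Nat.sub_zero, List.getD_eq_getElem _ _ (by simpa using h1)]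
  congr 1
  apply List.map_congr_left
  intro j _
  norm_num

theorem pvStep (pattern : List (List Int)) (n r : Nat) (h : r + 1 < n) :
    ((PySem.List.pyGet? (pvRotSpec pattern n r) (-1)).getD [] ::
        PySem.List.slice (pvRotSpec pattern n r) none (some (-1))).map (pvIncRow (n : Int)) =
      pvRotSpec pattern n (r + 1) := by
  have hn1 : n - 1 + 1 = n := by omega
  have h3 : List.range n = List.range (n - 1) ++ [n - 1] :=
    (congrArg List.range hn1.symm).trans (List.range_succ)
  have h2 : List.range n = 0 :: (List.range (n - 1)).map Nat.succ :=
    (congrArg List.range hn1.symm).trans List.range_succ_eq_map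
  have hsplit : pvRotSpec pattern n r =
      (List.range (n - 1)).map (fun k => pvValA pattern n r (pvPrevIdx n r k)) ++
        [pvValA pattern n r (pvPrevIdx n r (n - 1))] := by
    unfold pvRotSpec
    rw [h3]
    simp
  rw [hsplit, PySem.List.pyGet?_neg_one_append_singleton, PySem.List.slice_to_neg_one,
    List.dropLast_concat]
  simp only [Option.getD_some, List.map_cons, List.map_map]
  unfold pvRotSpec
  rw [h2, List.map_cons, List.map_map]
  congr 1
  · rw [pvInc_val]
    congr 1
    unfold pvPrevIdx
    split_ifs <;> omega
  · apply List.map_congr_left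
    intro k hk
    rw [List.mem_range] at hk
    simp only [Function.comp_apply]
    rw [pvInc_val]
    congr 1
    unfold pvPrevIdx
    split_ifs <;> omega

theorem pvFold (pattern : List (List Int)) (n : Nat) (hn : 0 < n) :
    ∀ t, t ≤ n - 1 →
      (List.range t).foldl (fun st _ =>
          (st.1 ++ [((PySem.List.pyGet? st.2 (-1)).getD [] ::
              PySem.List.slice st.2 none (some (-1))).map (pvIncRow (n : Int))],
           ((PySem.List.pyGet? st.2 (-1)).getD [] ::
              PySem.List.slice st.2 none (some (-1))).map (pvIncRow (n : Int))))
        ([pvRotSpec pattern n 0], pvRotSpec pattern n 0) =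
      ((List.range (t + 1)).map (pvRotSpec pattern n), pvRotSpec pattern n t) := by
  intro t
  induction t with
  | zero => intro _; simp
  | succ t ih =>
    intro ht
    rw [List.range_succ, List.foldl_append, ih (by omega)]
    simp only [List.foldl_cons, List.foldl_nil]
    rw [pvStep pattern n t (by omega)]
    rw [show List.range (t + 1 + 1) = List.range (t + 1) ++ [t + 1] from List.range_succ,
      List.map_append]
    simp

-- ===== VERDICT (by name: the statement is the Claim_ definition above) =====
theorem pvA_eq (pattern : List (List Int)) :
    cyclic_rotations pattern =
      (List.range pattern.length).map (pvRotSpec pattern pattern.length) := by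
  unfold cyclic_rotations
  show (List.range pattern.length).foldl (fun out r => out ++
      [(List.range pattern.length).foldl (fun np i =>
        np.set ((i + r) % pattern.length)
          (PySem.List.sorted ((pattern.getD i []).map
            (fun j => (j + (r : Int)) % (pattern.length : Int))) (fun x => x) false))
        (List.replicate pattern.length ([] : List Int))]) [] = _
  rw [pvFoldl_append_map]
  simp only [List.nil_append]
  apply List.map_congr_left
  intro r hr
  rw [List.mem_range] at hr
  exact pvA_row pattern pattern.length r rfl hr

theorem cyclic_rotations_spec : Claim_equal_cyclic_rotations := by
  intro pattern _
  unfold Spec_cyclic_rotations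
  rw [pvA_eq]
  unfold cyclic_rotations_alt
  by_cases hn : pattern.length = 0
  · simp [hn]
  · have hn1 : pattern.length - 1 + 1 = pattern.length := by omega
    simp only [hn, if_false]
    rw [← pvRot0]
    rw [pvFold pattern pattern.length (by omega) (pattern.length - 1) le_rfl]
    rw [hn1]
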